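-- pv_equiv track=rewrite | github.com/tomasfank/programacion-1 | TP_3/ejercicio2.py | matrizA
-- ===== SOURCE A (Python) =====
-- def matrizA(tam):
--     matriz = [[0]* tam for i in range(tam)]
--     filas = len(matriz)
--     columnas = len(matriz[0])
--     x = 1
--     for i in range(filas):
--         for j in range(columnas):
--             if i == j:
--                 matriz[i][j] = x
--                 x += 2
--     return matriz
-- ===== SOURCE B (Python) =====
-- def matrizA(tam):
--     matriz = [[0] * tam for _ in range(tam)]
--     for i in range(tam):
--         matriz[i][i] = 2 * i + 1
--     return matriz
-- ===== Notes on version B (the rewrite author's own statement) =====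
-- stated objective: simpler
-- what changed: Replaced the nested row/column scan with an i==j test by a single O(n) loop that writes 2*i+1 directly into each diagonal cell of the zero matrix.
import Mathlib
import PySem

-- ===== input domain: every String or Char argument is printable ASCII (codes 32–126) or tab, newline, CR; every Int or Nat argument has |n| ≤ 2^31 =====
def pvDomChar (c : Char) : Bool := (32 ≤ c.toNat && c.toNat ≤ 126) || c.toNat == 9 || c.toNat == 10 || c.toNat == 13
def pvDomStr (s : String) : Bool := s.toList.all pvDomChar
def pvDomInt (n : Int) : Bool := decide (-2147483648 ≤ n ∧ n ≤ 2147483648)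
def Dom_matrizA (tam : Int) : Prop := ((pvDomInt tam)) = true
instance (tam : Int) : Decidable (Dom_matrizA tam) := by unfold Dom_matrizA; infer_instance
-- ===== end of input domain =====

-- B builds the same zero matrix but fills the diagonal in one direct loop (matriz[i][i] = 2*i+1),
-- dropping A's inner column scan and i==j test: simpler, same return value wherever A returns.

-- ===== PORT A =====
-- one inner-loop step of A: 'if i == j: matriz[i][j] = x; x += 2' on state (matriz, x)
def pvRowStep (i : Int) (st : List (List Int) × Int) (j : Int) : List (List Int) × Int :=
  if i == j then (st.1.set i.toNat ((st.1.getD i.toNat []).set j.toNat st.2), st.2 + 2) else st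

def matrizA (tam : Int) : List (List Int) :=
  let matriz := (PySem.List.pyRange 0 tam 1).map (fun _ => List.replicate tam.toNat (0 : Int))
  let filas : Int := matriz.length
  -- Python 'len(matriz[0])' raises IndexError when matriz = []; Pre_ excludes that, getD 0 is unreachable inside Pre_
  let columnas : Int := ((PySem.List.pyGet? matriz 0).getD []).length
  let st := (PySem.List.pyRange 0 filas 1).foldl
      (fun st i => (PySem.List.pyRange 0 columnas 1).foldl (pvRowStep i) st) (matriz, 1)
  st.1

-- ===== PORT B =====
-- one step of B's single loop: 'matriz[i][i] = 2*i + 1'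
def pvDiagStep (m : List (List Int)) (i : Int) : List (List Int) :=
  m.set i.toNat ((m.getD i.toNat []).set i.toNat (2 * i + 1))

def matrizA_alt (tam : Int) : List (List Int) :=
  let matriz := (PySem.List.pyRange 0 tam 1).map (fun _ => List.replicate tam.toNat (0 : Int))
  (PySem.List.pyRange 0 tam 1).foldl pvDiagStep matriz

-- ===== PRECONDITION & SPEC =====
-- A raises IndexError on tam ≤ 0 (len(matriz[0]) on the empty matrix); Pre_ excludes exactly those inputs.
def Pre_matrizA (tam : Int) : Prop := 1 ≤ tam
instance (tam : Int) : Decidable (Pre_matrizA tam) := by unfold Pre_matrizA; infer_instance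
def pvWitness_matrizA : Int := 3

def Spec_matrizA (tam : Int) (out : List (List Int)) : Prop := out = matrizA_alt tam
instance (tam : Int) (out : List (List Int)) : Decidable (Spec_matrizA tam out) := by unfold Spec_matrizA; infer_instance

-- ===== CLAIM (what is proved, stated in full; the proofs are below) =====
def Claim_equal_matrizA : Prop := ∀ (tam : Int), Dom_matrizA tam → Pre_matrizA tam → Spec_matrizA tam (matrizA tam)

-- ===== LEMMAS AND PROOFS =====

-- a stretch of the inner loop where i never equals j does nothing
theorem foldl_rowStep_id (i : Int) (L : List Int) (h : ∀ j ∈ L, j ≠ i)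
    (st : List (List Int) × Int) : L.foldl (pvRowStep i) st = st := by
  induction L generalizing st with
  | nil => rfl
  | cons a t ih =>
    have ha : a ≠ i := h a (by simp)
    simp only [List.foldl_cons, pvRowStep, beq_iff_eq]
    rw [if_neg (fun e => ha e.symm)]
    exact ih (fun j hj => h j (by simp [hj])) st

-- A's whole inner loop over range(columnas) is exactly one diagonal write plus x += 2
theorem inner_loop_eq (i c : Int) (hi : 0 ≤ i) (hic : i < c)
    (m : List (List Int)) (x : Int) :
    (PySem.List.pyRange 0 c 1).foldl (pvRowStep i) (m, x)
      = (m.set i.toNat ((m.getD i.toNat []).set i.toNat x), x + 2) := by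
  rw [PySem.List.pyRange_one_append 0 i c hi (le_of_lt hic),
      PySem.List.pyRange_one_cons hic]
  rw [List.foldl_append]
  rw [foldl_rowStep_id i (PySem.List.pyRange 0 i 1) (fun j hj => by
        have := (PySem.List.mem_pyRange_one).1 hj; omega) (m, x)]
  simp only [List.foldl_cons, pvRowStep, beq_self_eq_true, if_true]
  exact foldl_rowStep_id i (PySem.List.pyRange (i+1) c 1) (fun j hj => by
        have := (PySem.List.mem_pyRange_one).1 hj; omega) _

-- outer loop correspondence: A's fold over range(k) equals B's fold, and x = 1 + 2*k
theorem outer_loop_eq (c : Int) (k : Nat) (hk : (k : Int) ≤ c) (m : List (List Int)) :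
    (PySem.List.pyRange 0 (k : Int) 1).foldl
        (fun st i => (PySem.List.pyRange 0 c 1).foldl (pvRowStep i) st) (m, 1)
      = ((PySem.List.pyRange 0 (k : Int) 1).foldl pvDiagStep m, 1 + 2 * (k : Int)) := by
  induction k with
  | zero => simp [PySem.List.pyRange_one_eq_nil]
  | succ n ih =>
    have hn : (n : Int) ≤ c := by push_cast at hk ⊢; omega
    have hsplit : PySem.List.pyRange 0 ((n : Int) + 1) 1
        = PySem.List.pyRange 0 (n : Int) 1 ++ [(n : Int)] :=
      PySem.List.pyRange_one_succ_right (by positivity)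
    push_cast
    rw [hsplit, List.foldl_append, List.foldl_append, ih hn]
    simp only [List.foldl_cons, List.foldl_nil]
    rw [inner_loop_eq (n : Int) c (by positivity) (by push_cast at hk; omega),
        show (1 + 2 * (n : Int)) = 2 * (n : Int) + 1 from by ring]
    simp only [Prod.mk.injEq]
    exact ⟨by simp [pvDiagStep], by ring⟩

theorem matrizA_eq_alt (tam : Int) (h : 1 ≤ tam) : matrizA tam = matrizA_alt tam := by
  obtain ⟨n, rfl⟩ : ∃ n : Nat, tam = (n : Int) :=
    ⟨tam.toNat, (Int.toNat_of_nonneg (by omega)).symm⟩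
  have hn1 : (0 : Int) < (n : Int) := by exact_mod_cast h
  unfold matrizA matrizA_alt
  simp only [Int.toNat_natCast]
  have hget : PySem.List.pyGet? ((PySem.List.pyRange 0 (n : Int) 1).map
      (fun _ => List.replicate n (0 : Int))) 0
      = some (List.replicate n (0 : Int)) := by
    rw [PySem.List.pyRange_one_cons hn1, List.map_cons, PySem.List.pyGet?_zero_cons]
  simp only [hget, Option.getD_some, List.length_replicate, List.length_map,
    PySem.List.length_pyRange_one, Int.sub_zero, Int.toNat_natCast]
  rw [outer_loop_eq (n : Int) n le_rfl]

-- ===== VERDICT (by name: the statement is the Claim_ definition above) =====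
theorem matrizA_spec : Claim_equal_matrizA := by
  intro tam _ hpre
  exact matrizA_eq_alt tam hpre
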